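-- pv_equiv track=rewrite | github.com/dishankgoel/CodeChef-Solutions | prtagn.py | xor_c
-- ===== SOURCE A (Python) =====
-- from collections import defaultdict
--
-- def xor_c(x, l):
--     mb = defaultdict(int)
--     for m in l:
--         while mb[m.bit_length() - 1] != 0:
--             m ^= mb[m.bit_length() - 1]
--         if m != 0:
--             mb[m.bit_length() - 1] = m
--     while mb[x.bit_length() - 1] != 0:
--         x ^= mb[x.bit_length() - 1]
--     return x == 0
-- ===== SOURCE B (Python) =====
-- def _ins(basis, v):
--     # insert v into the decreasingly sorted basis
--     if not basis or v >= basis[0]: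
--         return [v] + basis
--     return [basis[0]] + _ins(basis[1:], v)
--
-- def xor_c(x, l):
--     basis = []  # reduced XOR basis, kept sorted in decreasing order
--     for v in l:
--         for b in basis:
--             v = min(v, v ^ b)
--         if v != 0:
--             basis = _ins(basis, v)
--     for b in basis:
--         x = min(x, x ^ b)
--     return x == 0
-- ===== Notes on version B (the rewrite author's own statement) =====
-- stated objective: alternative
-- what changed: Replaces A's defaultdict keyed on bit_length with a bit-free greedy scheme: the basis is a plain decreasingly sorted list, every candidate (and the query) is reduced by one pass of v = min(v, v ^ b) over it, and surviving values are inserted in order; Pre_ admits all-nonnegative lists, constant negative lists away from their accidental corners, and any x whose bit_length dominates all elements', and excludes the remaining lists with a negative element, where A's abs-keyed bit_length reduction frequently diverges and its terminating values are accidents of that keying.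
-- outside the precondition, e.g. on xor_c(0, [-3]): A returns True, B returns False; on xor_c(2, [-4, 1, -5, -6]): A does not finish within the time limit, B returns False; on xor_c(-3, [-3]): A returns True, B returns False
import Mathlib
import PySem

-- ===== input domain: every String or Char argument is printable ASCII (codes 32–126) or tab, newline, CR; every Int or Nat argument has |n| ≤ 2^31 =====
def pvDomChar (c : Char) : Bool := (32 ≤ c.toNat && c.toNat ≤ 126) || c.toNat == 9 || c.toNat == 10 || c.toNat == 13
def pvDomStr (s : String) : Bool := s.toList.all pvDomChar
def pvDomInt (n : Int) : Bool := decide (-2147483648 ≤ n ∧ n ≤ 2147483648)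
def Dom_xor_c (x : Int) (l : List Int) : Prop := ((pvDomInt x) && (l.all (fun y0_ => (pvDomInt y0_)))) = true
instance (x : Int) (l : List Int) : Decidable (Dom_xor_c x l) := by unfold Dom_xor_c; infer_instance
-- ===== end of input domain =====

-- B decides XOR-span membership with bit-free greedy reduction: each candidate is minimised
-- with min(v, v ^ b) against a basis kept as a decreasingly sorted plain list (alternative;
-- no bit_length keys, no dict).

-- ===== PORT A =====
-- A's inner 'while mb[v.bit_length()-1] != 0: v ^= mb[...]' loop; the fuel argument is only a
-- totality guard: a terminating Python run never repeats a value, the values stay inside the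
-- XOR-closure of v and the ≤ len(l) stored entries, so 2^len(l) + bit_length v + 1 steps always
-- suffice; where Python A diverges the fuel runs out (such inputs are outside Pre_).
def xorcReduce (mb : PySem.Dict Int Int) : Nat → Int → Int
  | 0, v => v
  | fuel+1, v =>
    let b := mb.getD ((PySem.Int.bitLength v : Int) - 1) 0
    if b ≠ 0 then xorcReduce mb fuel (PySem.Int.bxor v b) else v

def xor_c (x : Int) (l : List Int) : Bool :=
  let mb := l.foldl (fun mb m =>
    let m' := xorcReduce mb (2 ^ l.length + PySem.Int.bitLength m + 1) m
    if m' ≠ 0 then mb.insert ((PySem.Int.bitLength m' : Int) - 1) m' else mb)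
    PySem.Dict.empty
  let x' := xorcReduce mb (2 ^ l.length + PySem.Int.bitLength x + 1) x
  decide (x' = 0)

-- ===== PORT B =====
-- Source B's recursive _ins: insert v into the decreasingly sorted basis.
def altIns : List Int → Int → List Int
  | [], v => [v]
  | b :: bs, v => if b ≤ v then v :: b :: bs else b :: altIns bs v

-- Source B's 'for b in basis: v = min(v, v ^ b)' pass.
def altRed (basis : List Int) (v : Int) : Int :=
  basis.foldl (fun v b => min v (PySem.Int.bxor v b)) v

def xor_c_alt (x : Int) (l : List Int) : Bool :=
  let basis := l.foldl (fun basis v =>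
    let v' := altRed basis v
    if v' ≠ 0 then altIns basis v' else basis) []
  decide (altRed basis x = 0)

-- ===== PRECONDITION & SPEC =====
-- Pre_ admits every all-nonnegative list (any x), the constant negative lists away from their
-- accidental corners, and every x whose bit_length strictly dominates all elements' (both
-- programs answer False there); it excludes other lists containing a negative element: there A's
-- bit_length-keyed reduction (bit_length reads the absolute value) frequently diverges, and
-- where it does terminate its value is an accident of that keying.
def Pre_xor_c (x : Int) (l : List Int) : Prop :=
  (∀ m ∈ l, 0 ≤ m) ∨
  (l ≠ [] ∧ (∀ m ∈ l, m = l.headI) ∧ l.headI < 0 ∧ x ≠ 0 ∧ x ≠ l.headI ∧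
    (PySem.Int.bitLength x ≠ PySem.Int.bitLength l.headI ∨
     PySem.Int.bitLength (PySem.Int.bxor x l.headI) ≠ PySem.Int.bitLength l.headI)) ∨
  (x ≠ 0 ∧ ∀ m ∈ l, PySem.Int.bitLength m + 1 < PySem.Int.bitLength x)
instance (x : Int) (l : List Int) : Decidable (Pre_xor_c x l) := by unfold Pre_xor_c; infer_instance
def pvWitness_xor_c : Int × List Int := (5, [1, 2, 6])

def Spec_xor_c (x : Int) (l : List Int) (out : Bool) : Prop := out = xor_c_alt x l
instance (x : Int) (l : List Int) (out : Bool) : Decidable (Spec_xor_c x l out) := by unfold Spec_xor_c; infer_instance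

-- ===== CLAIM (what is proved, stated in full; the proofs are below) =====
def Claim_equal_xor_c : Prop := ∀ (x : Int) (l : List Int), Dom_xor_c x l → Pre_xor_c x l → Spec_xor_c x l (xor_c x l)

-- ===== LEMMAS AND PROOFS =====

-- bit length of a natural number, as the ports see it
def blN (n : Nat) : Nat := PySem.Int.bitLength (n : Int)

-- the value A's dict holds at key k, described from a ghost list of the stored values
def lookupTop : List Nat → Int → Nat
  | [], _ => 0
  | b :: bs, k => if (blN b : Int) - 1 = k then b else lookupTop bs k

-- A-side invariant: mb is exactly the ghost list bsA indexed by top bit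
def InvA (mb : PySem.Dict Int Int) (bsA : List Nat) : Prop :=
  (∀ k : Int, mb.getD k 0 = (lookupTop bsA k : Int)) ∧
  (∀ b ∈ bsA, 0 < b) ∧
  bsA.Pairwise (fun a b => blN a ≠ blN b)

-- B-side invariant: positive entries with strictly decreasing bit lengths
def InvB (bsB : List Nat) : Prop :=
  (∀ b ∈ bsB, 0 < b) ∧ bsB.Pairwise (fun a b => blN b < blN a)

-- XOR span of a list of naturals
inductive NSpan : List Nat → Nat → Prop
  | zero (bs : List Nat) : NSpan bs 0
  | step {bs : List Nat} {v : Nat} (b : Nat) (hb : b ∈ bs) (h : NSpan bs v) : NSpan bs (v ^^^ b)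

def castL (bs : List Nat) : List Int := bs.map (fun b => (b : Int))

-- Nat-level mirror of Source B's _ins
def insN : List Nat → Nat → List Nat
  | [], v => [v]
  | b :: bs, v => if b ≤ v then v :: b :: bs else b :: insN bs v

lemma bl_le_iff (N i : Nat) : blN N ≤ i ↔ N < 2 ^ i := by
  constructor
  · intro h
    have h1 := PySem.Int.lt_two_pow_bitLength (N : Int)
    simp [blN] at h ⊢
    exact lt_of_lt_of_le (by simpa using h1) (Nat.pow_le_pow_right (by norm_num) h)
  · intro h
    by_contra hc
    push Not at hc
    have hN : (N : Int) ≠ 0 := by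
      intro h0
      simp [blN, h0, PySem.Int.bitLength_zero] at hc
    have h2 := PySem.Int.two_pow_bitLength_le (N : Int) hN
    simp at h2
    have : 2 ^ i ≤ 2 ^ (blN N - 1) :=
      Nat.pow_le_pow_right (by norm_num) (by unfold blN at hc ⊢; omega)
    unfold blN at this
    omega

lemma blN_pos {N : Nat} (h : N ≠ 0) : 1 ≤ blN N := by
  by_contra hc
  have hz : blN N = 0 := by omega
  have := (bl_le_iff N 0).mp (le_of_eq hz)
  simp at this
  exact h this

lemma blN_zero : blN 0 = 0 := by
  have h1 : blN 0 ≤ 0 := (bl_le_iff 0 0).mpr (by norm_num)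
  omega

lemma testBit_top {N : Nat} (h : N ≠ 0) : N.testBit (blN N - 1) = true := by
  have hpos : 0 < N := Nat.pos_of_ne_zero h
  have h1 : N < 2 ^ (blN N - 1 + 1) := by
    have := PySem.Int.lt_two_pow_bitLength (N : Int)
    simp at this
    have hb := blN_pos h
    unfold blN at hb ⊢
    have : N < 2 ^ PySem.Int.bitLength (N:Int) := this
    calc N < 2 ^ PySem.Int.bitLength (N:Int) := this
      _ ≤ 2 ^ (PySem.Int.bitLength (N:Int) - 1 + 1) := Nat.pow_le_pow_right (by norm_num) (by omega)
  have h2 : 2 ^ (blN N - 1) ≤ N := by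
    have hN : (N : Int) ≠ 0 := by exact_mod_cast h
    have := PySem.Int.two_pow_bitLength_le (N : Int) hN
    simp at this
    exact this
  rw [Nat.testBit_eq_decide_div_mod_eq]
  have hp : (0:Nat) < 2 ^ (blN N - 1) := Nat.two_pow_pos _
  have h3 : N < 2 ^ (blN N - 1) * 2 := by rw [pow_succ] at h1; exact h1
  have lo : 1 ≤ N / 2 ^ (blN N - 1) := (Nat.one_le_div_iff hp).mpr h2
  have hi : N / 2 ^ (blN N - 1) < 2 := (Nat.div_lt_iff_lt_mul hp).mpr (by omega)
  have h4 : N / 2 ^ (blN N - 1) = 1 := by omega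
  simp [h4]

lemma blN_mono {a b : Nat} (h : a ≤ b) : blN a ≤ blN b := by
  have h1 : a < 2 ^ blN b := lt_of_le_of_lt h ((bl_le_iff b (blN b)).mp le_rfl)
  exact (bl_le_iff a (blN b)).mpr h1

lemma blN_xor_of_lt {a b : Nat} (hb : b ≠ 0) (h : blN a < blN b) : blN (a ^^^ b) = blN b := by
  have hbl1 : 1 ≤ blN b := blN_pos hb
  set t := blN b - 1 with ht
  have htb : b.testBit t = true := testBit_top hb
  have hat : a < 2 ^ t := (bl_le_iff a t).mpr ?_ |> (fun _ => (bl_le_iff a t).mp (by omega))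
  · have hta : a.testBit t = false := Nat.testBit_lt_two_pow hat
    have hxt : (a ^^^ b).testBit t = true := by
      rw [Nat.testBit_xor, hta, htb]; rfl
    have hlo : 2 ^ t ≤ a ^^^ b := Nat.ge_two_pow_of_testBit hxt
    have hhi : a ^^^ b < 2 ^ (t + 1) := by
      apply Nat.xor_lt_two_pow
      · exact lt_of_lt_of_le hat (Nat.pow_le_pow_right (by norm_num) (by omega))
      · exact (bl_le_iff b (t+1)).mp (by omega)
    have hub : blN (a ^^^ b) ≤ t + 1 := (bl_le_iff _ _).mpr hhi
    have hlb : ¬ blN (a ^^^ b) ≤ t := by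
      rw [bl_le_iff]; omega
    omega
  · exact (bl_le_iff a t).mp (by omega)

lemma blN_xor_max {a b : Nat} (ha : a ≠ 0) (hb : b ≠ 0) (hne : blN a ≠ blN b) :
    blN (a ^^^ b) = max (blN a) (blN b) := by
  rcases lt_or_gt_of_ne hne with hlt | hlt
  · rw [blN_xor_of_lt hb hlt]; omega
  · rw [Nat.xor_comm, blN_xor_of_lt ha hlt]; omega

lemma xor_lt (a b i : Nat) (ha : a < 2 ^ (i+1)) (hb : b < 2 ^ (i+1))
    (ha' : a.testBit i = true) (hb' : b.testBit i = true) : a ^^^ b < 2 ^ i := by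
  apply Nat.lt_pow_two_of_testBit
  intro j hj
  rcases Nat.eq_or_lt_of_le hj with h | h
  · rw [Nat.testBit_xor, ← h, ha', hb']; rfl
  · rw [Nat.testBit_xor,
      Nat.testBit_lt_two_pow (lt_of_lt_of_le ha (Nat.pow_le_pow_right (by norm_num) h)),
      Nat.testBit_lt_two_pow (lt_of_lt_of_le hb (Nat.pow_le_pow_right (by norm_num) h))]
    rfl

lemma blN_xor_lt {a b : Nat} (ha : a ≠ 0) (hb : b ≠ 0) (heq : blN a = blN b) :
    blN (a ^^^ b) < blN a := by
  have h1 : 1 ≤ blN a := blN_pos ha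
  set t := blN a - 1 with ht
  have hab : a < 2 ^ (t+1) := (bl_le_iff a (t+1)).mp (by omega)
  have hbb : b < 2 ^ (t+1) := (bl_le_iff b (t+1)).mp (by omega)
  have hta : a.testBit t = true := testBit_top ha
  have htb : b.testBit t = true := by
    have := testBit_top hb
    rwa [← heq] at this
  have := xor_lt a b t hab hbb hta htb
  have h2 : blN (a ^^^ b) ≤ t := (bl_le_iff _ _).mpr this
  omega

-- min(v, v ^ b) in terms of the top bit of b (nonnegative values)
lemma minstep (N B : Nat) (hB : 0 < B) :
    min ((N : Nat) : Int) (PySem.Int.bxor (N : Int) (B : Int)) =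
      ((if N.testBit (blN B - 1) then N ^^^ B else N : Nat) : Int) := by
  have hbxor : PySem.Int.bxor (N : Int) (B : Int) = ((N ^^^ B : Nat) : Int) :=
    PySem.Int.bxor_natCast N B
  rw [hbxor]
  have hmin : min ((N : Nat) : Int) ((N ^^^ B : Nat) : Int) = ((min N (N ^^^ B) : Nat) : Int) := by
    push_cast
    rfl
  rw [hmin]
  congr 1
  set t := blN B - 1 with ht
  have htB : B.testBit t = true := testBit_top (by omega)
  by_cases hb : N.testBit t = true
  · -- N ^^^ B < N : they agree above t, differ at t
    have hlt : N ^^^ B < N := by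
      apply Nat.lt_of_testBit t
      · rw [Nat.testBit_xor, hb, htB]; rfl
      · exact hb
      · intro j hj
        rw [Nat.testBit_xor, Nat.testBit_lt_two_pow (x := B) ?_, Bool.xor_false]
        exact (bl_le_iff B j).mp (by omega)
    simp [hb, Nat.min_eq_right (le_of_lt hlt)]
  · have hb' : N.testBit t = false := by simpa using hb
    have hlt : N < N ^^^ B := by
      apply Nat.lt_of_testBit t hb'
      · rw [Nat.testBit_xor, hb', htB]; rfl
      · intro j hj
        rw [Nat.testBit_xor, Nat.testBit_lt_two_pow (x := B) ?_, Bool.xor_false]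
        exact (bl_le_iff B j).mp (by omega)
    simp [hb', Nat.min_eq_left (le_of_lt hlt)]

-- span basics
lemma nspan_mem {bs : List Nat} {b : Nat} (h : b ∈ bs) : NSpan bs b := by
  have := NSpan.step b h (NSpan.zero bs)
  simpa using this

lemma nspan_xor {bs : List Nat} {a c : Nat} (ha : NSpan bs a) (hc : NSpan bs c) :
    NSpan bs (a ^^^ c) := by
  induction hc with
  | zero => simpa using ha
  | step b hb h ih =>
    have := NSpan.step b hb ih
    rwa [Nat.xor_assoc] at this

lemma nspan_mono {bs bs' : List Nat} (h : ∀ b ∈ bs, b ∈ bs') {v : Nat} (hv : NSpan bs v) :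
    NSpan bs' v := by
  induction hv with
  | zero => exact NSpan.zero _
  | step b hb _ ih => exact NSpan.step b (h b hb) ih

lemma nspan_nil {v : Nat} (h : NSpan [] v) : v = 0 := by
  induction h with
  | zero => rfl
  | step b hb _ _ => cases hb

lemma nspan_cons_iff {c : Nat} {bs : List Nat} {v : Nat} :
    NSpan (c :: bs) v ↔ NSpan bs v ∨ NSpan bs (v ^^^ c) := by
  constructor
  · intro h
    induction h with
    | zero => exact Or.inl (NSpan.zero _)
    | step b hb _ ih =>
      rcases List.mem_cons.mp hb with rfl | hb'
      · rcases ih with h1 | h1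
        · exact Or.inr (by rwa [Nat.xor_xor_cancel_right])
        · exact Or.inl h1
      · rcases ih with h1 | h1
        · exact Or.inl (NSpan.step b hb' h1)
        · refine Or.inr ?_
          have h2 := NSpan.step b hb' h1
          have heq : ∀ w : Nat, (w ^^^ c) ^^^ b = (w ^^^ b) ^^^ c := fun w => by
            rw [Nat.xor_assoc, Nat.xor_assoc, Nat.xor_comm c b]
          rwa [heq] at h2
  · intro h
    rcases h with h | h
    · exact nspan_mono (fun b hb => List.mem_cons_of_mem _ hb) h
    · have h1 : NSpan (c :: bs) (v ^^^ c) :=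
        nspan_mono (fun b hb => List.mem_cons_of_mem _ hb) h
      have := NSpan.step c (List.mem_cons_self) h1
      rwa [Nat.xor_xor_cancel_right] at this

lemma nspan_congr {bs bs' : List Nat} (h : ∀ b, b ∈ bs ↔ b ∈ bs') (v : Nat) :
    NSpan bs v ↔ NSpan bs' v := by
  exact ⟨nspan_mono (fun b hb => (h b).mp hb), nspan_mono (fun b hb => (h b).mpr hb)⟩

-- every nonzero span member has the bit length of some basis element
lemma nspan_top {bs : List Nat} (hpos : ∀ b ∈ bs, 0 < b)
    (hdist : bs.Pairwise (fun a b => blN a ≠ blN b)) {v : Nat} (hv : NSpan bs v) (h0 : v ≠ 0) :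
    ∃ b ∈ bs, blN v = blN b := by
  induction bs generalizing v with
  | nil => exact absurd (nspan_nil hv) h0
  | cons c bs ih =>
    have hc : 0 < c := hpos c (List.mem_cons_self)
    have hpos' : ∀ b ∈ bs, 0 < b := fun b hb => hpos b (List.mem_cons_of_mem _ hb)
    have hdist' := (List.pairwise_cons.mp hdist).2
    have hhead := (List.pairwise_cons.mp hdist).1
    rcases nspan_cons_iff.mp hv with h | h
    · obtain ⟨b, hb, hbl⟩ := ih hpos' hdist' h h0
      exact ⟨b, List.mem_cons_of_mem _ hb, hbl⟩
    · by_cases hw : v ^^^ c = 0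
      · have hvc : v = c := by
          have h1 := congrArg (fun t => t ^^^ c) hw
          simpa [Nat.xor_assoc] using h1
        exact ⟨c, List.mem_cons_self, by rw [hvc]⟩
      · obtain ⟨b, hb, hbl⟩ := ih hpos' hdist' h hw
        have hcb : blN (v ^^^ c) ≠ blN c := by
          rw [hbl]; exact (hhead b hb).symm
        have hveq : v = (v ^^^ c) ^^^ c := by rw [Nat.xor_xor_cancel_right]
        have hmax : blN v = max (blN (v ^^^ c)) (blN c) := by
          conv_lhs => rw [hveq]
          exact blN_xor_max hw (by omega) hcb
        rcases max_cases (blN (v ^^^ c)) (blN c) with ⟨hm, _⟩ | ⟨hm, _⟩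
        · exact ⟨b, List.mem_cons_of_mem _ hb, by rw [hmax, hm, hbl]⟩
        · exact ⟨c, List.mem_cons_self, by rw [hmax, hm]⟩

lemma nspan_bound {bs : List Nat} {t : Nat} (hb : ∀ b ∈ bs, b < 2 ^ t) {v : Nat}
    (hv : NSpan bs v) : v < 2 ^ t := by
  induction hv with
  | zero => exact Nat.two_pow_pos t
  | step b hbm _ ih => exact Nat.xor_lt_two_pow ih (hb b hbm)

-- lookupTop facts
lemma lookupTop_ne {bs : List Nat} {k : Int} (h : lookupTop bs k ≠ 0) :
    lookupTop bs k ∈ bs ∧ ((blN (lookupTop bs k) : Int) - 1 = k) := by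
  induction bs with
  | nil => simp [lookupTop] at h
  | cons c bs ih =>
    rw [lookupTop] at h
    by_cases hc : (blN c : Int) - 1 = k
    · rw [if_pos hc] at h
      rw [lookupTop, if_pos hc]
      exact ⟨List.mem_cons_self, hc⟩
    · rw [if_neg hc] at h
      rw [lookupTop, if_neg hc]
      obtain ⟨h1, h2⟩ := ih h
      exact ⟨List.mem_cons_of_mem _ h1, h2⟩

lemma lookupTop_of_mem {bs : List Nat} (hpos : ∀ b ∈ bs, 0 < b) {b : Nat} (hb : b ∈ bs) :
    lookupTop bs ((blN b : Int) - 1) ≠ 0 := by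
  induction bs with
  | nil => cases hb
  | cons c bs ih =>
    rw [lookupTop]
    by_cases hc : (blN c : Int) - 1 = (blN b : Int) - 1
    · rw [if_pos hc]
      have : 0 < c := hpos c (List.mem_cons_self)
      omega
    · rw [if_neg hc]
      rcases List.mem_cons.mp hb with rfl | hb'
      · exact absurd rfl hc
      · exact ih (fun a ha => hpos a (List.mem_cons_of_mem _ ha)) hb' 

-- A's reduction, characterised
lemma redA {mb : PySem.Dict Int Int} {bsA : List Nat} (hI : InvA mb bsA) :
    ∀ (fuel : Nat) (N : Nat), blN N < fuel →
      ∃ r : Nat, xorcReduce mb fuel (N : Int) = (r : Int) ∧ NSpan bsA (N ^^^ r) ∧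
        lookupTop bsA ((blN r : Int) - 1) = 0 := by
  intro fuel
  induction fuel with
  | zero => intro N h; omega
  | succ f ih =>
    intro N hN
    have hkey : mb.getD ((PySem.Int.bitLength ((N : Nat) : Int) : Int) - 1) 0 =
        ((lookupTop bsA ((blN N : Int) - 1) : Nat) : Int) := hI.1 _
    by_cases hL : lookupTop bsA ((blN N : Int) - 1) = 0
    · refine ⟨N, ?_, by simpa using NSpan.zero bsA, hL⟩
      rw [xorcReduce]
      simp only [hkey, hL]
      simp
    · obtain ⟨hLmem, hLbl⟩ := lookupTop_ne hL
      set L := lookupTop bsA ((blN N : Int) - 1) with hLdef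
      have hLpos : 0 < L := hI.2.1 L hLmem
      have hblL : blN L = blN N := by omega
      have hN0 : N ≠ 0 := by
        intro h0
        have h1 := blN_pos (show L ≠ 0 by omega)
        rw [h0, blN_zero] at hblL
        omega
      have hlt : blN (N ^^^ L) < blN N := blN_xor_lt hN0 (by omega) hblL.symm
      obtain ⟨r, hr, hsp, hstop⟩ := ih (N ^^^ L) (by omega)
      refine ⟨r, ?_, ?_, hstop⟩
      · rw [xorcReduce]
        simp only [hkey]
        rw [if_pos (by exact_mod_cast hL), PySem.Int.bxor_natCast]
        exact hr
      · have h1 := NSpan.step L hLmem hsp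
        have h2 : ((N ^^^ L) ^^^ r) ^^^ L = N ^^^ r := by
          simp [Nat.xor_comm, Nat.xor_left_comm]
        rwa [h2] at h1

-- B's reduction, characterised
lemma redB {bsB : List Nat} (hI : InvB bsB) (N : Nat) :
    ∃ r : Nat, altRed (castL bsB) (N : Int) = (r : Int) ∧
      NSpan bsB (N ^^^ r) ∧ (∀ b ∈ bsB, r.testBit (blN b - 1) = false) := by
  induction bsB generalizing N with
  | nil => exact ⟨N, rfl, by simpa using NSpan.zero [], by simp⟩
  | cons b0 bs ih =>
    have hb0 : 0 < b0 := hI.1 b0 (List.mem_cons_self)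
    have hpos' : ∀ b ∈ bs, 0 < b := fun b hb => hI.1 b (List.mem_cons_of_mem _ hb)
    have hhead := (List.pairwise_cons.mp hI.2).1
    have hI' : InvB bs := ⟨hpos', (List.pairwise_cons.mp hI.2).2⟩
    set N1 : Nat := if N.testBit (blN b0 - 1) then N ^^^ b0 else N with hN1
    have hstep : altRed (castL (b0 :: bs)) (N : Int) =
        altRed (castL bs) (N1 : Int) := by
      show altRed (((b0 : Nat) : Int) :: castL bs) (N : Int) = _
      unfold altRed
      rw [List.foldl_cons, minstep N b0 hb0]
    obtain ⟨r, hr, hsp, hbits⟩ := ih hI' N1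
    have hN1bit : N1.testBit (blN b0 - 1) = false := by
      rw [hN1]
      by_cases hb : N.testBit (blN b0 - 1) = true
      · rw [if_pos hb, Nat.testBit_xor, hb, testBit_top (by omega)]; rfl
      · simp at hb
        rw [if_neg (by simp [hb]), hb]
    have hbound : ∀ b ∈ bs, b < 2 ^ (blN b0 - 1) := by
      intro b hb
      exact (bl_le_iff b _).mp (by have := hhead b hb; omega)
    refine ⟨r, by rw [hstep]; exact hr, ?_, ?_⟩
    · -- N ^^^ r = (N ^^^ N1) ^^^ (N1 ^^^ r)
      have hs1 : NSpan (b0 :: bs) (N ^^^ N1) := by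
        rw [hN1]
        by_cases hb : N.testBit (blN b0 - 1) = true
        · rw [if_pos hb, ← Nat.xor_assoc, Nat.xor_self, Nat.zero_xor]
          exact nspan_mem (List.mem_cons_self)
        · simp at hb
          rw [if_neg (by simp [hb]), Nat.xor_self]
          exact NSpan.zero _
      have hs2 : NSpan (b0 :: bs) (N1 ^^^ r) :=
        nspan_mono (fun b hb => List.mem_cons_of_mem _ hb) hsp
      have := nspan_xor hs1 hs2
      have heq : (N ^^^ N1) ^^^ (N1 ^^^ r) = N ^^^ r := by
        simp [Nat.xor_comm, Nat.xor_left_comm]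
      rwa [heq] at this
    · intro b hb
      rcases List.mem_cons.mp hb with rfl | hb'
      · have hslt : N1 ^^^ r < 2 ^ (blN b - 1) := nspan_bound hbound hsp
        have hst : (N1 ^^^ r).testBit (blN b - 1) = false := Nat.testBit_lt_two_pow hslt
        have hre : r = N1 ^^^ (N1 ^^^ r) := by rw [Nat.xor_xor_cancel_left]
        rw [hre, Nat.testBit_xor, hN1bit, hst]
        rfl
      · exact hbits b hb' 

-- reduction result is zero exactly on span members
lemma redA_zero_iff {bsA : List Nat} (hpos : ∀ b ∈ bsA, 0 < b)
    (hdist : bsA.Pairwise (fun a b => blN a ≠ blN b)) {N r : Nat}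
    (hsp : NSpan bsA (N ^^^ r)) (hstop : lookupTop bsA ((blN r : Int) - 1) = 0) :
    r = 0 ↔ NSpan bsA N := by
  constructor
  · intro h0
    subst h0
    rwa [Nat.xor_zero] at hsp
  · intro hN
    by_contra hr
    have hrs : NSpan bsA r := by
      have := nspan_xor hN hsp
      rwa [Nat.xor_xor_cancel_left] at this
    obtain ⟨b, hb, hbl⟩ := nspan_top hpos hdist hrs hr
    have := lookupTop_of_mem hpos hb
    rw [← hbl] at this
    exact this hstop

lemma redB_zero_iff {bsB : List Nat} (hI : InvB bsB) {N r : Nat}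
    (hsp : NSpan bsB (N ^^^ r)) (hstop : ∀ b ∈ bsB, r.testBit (blN b - 1) = false) :
    r = 0 ↔ NSpan bsB N := by
  constructor
  · intro h0
    subst h0
    rwa [Nat.xor_zero] at hsp
  · intro hN
    by_contra hr
    have hrs : NSpan bsB r := by
      have := nspan_xor hN hsp
      rwa [Nat.xor_xor_cancel_left] at this
    have hdist : bsB.Pairwise (fun a b => blN a ≠ blN b) :=
      hI.2.imp (fun h => by omega)
    obtain ⟨b, hb, hbl⟩ := nspan_top hI.1 hdist hrs hr
    have h1 : r.testBit (blN r - 1) = true := testBit_top hr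
    have h2 := hstop b hb
    rw [← hbl] at h2
    rw [h1] at h2
    cases h2

-- altIns on a cast list is insN
lemma altIns_map (bs : List Nat) (v : Nat) :
    altIns (castL bs) (v : Int) = castL (insN bs v) := by
  induction bs with
  | nil => rfl
  | cons b bs ih =>
    show altIns (((b:Nat):Int) :: castL bs) _ = _
    rw [altIns, insN]
    by_cases h : b ≤ v
    · rw [if_pos (by exact_mod_cast h), if_pos h]
      rfl
    · rw [if_neg (by exact_mod_cast h), if_neg h]
      show ((b:Nat):Int) :: altIns (castL bs) _ = castL (b :: insN bs v)
      rw [ih]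
      rfl

lemma insN_mem {bs : List Nat} {v c : Nat} : c ∈ insN bs v ↔ c = v ∨ c ∈ bs := by
  induction bs with
  | nil => simp [insN]
  | cons b bs ih =>
    rw [insN]
    by_cases h : b ≤ v
    · rw [if_pos h]
      simp
    · rw [if_neg h]
      simp [ih]
      tauto

lemma insN_invB {bs : List Nat} (hI : InvB bs) {v : Nat} (hv : 0 < v)
    (hfresh : ∀ b ∈ bs, blN v ≠ blN b) : InvB (insN bs v) := by
  induction bs with
  | nil =>
    refine ⟨?_, ?_⟩
    · intro b hb
      rw [insN] at hb
      simp at hb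
      omega
    · rw [insN]
      simp
  | cons b0 bs ih =>
    obtain ⟨hpos, hpw⟩ := hI
    have hb0 : 0 < b0 := hpos b0 (List.mem_cons_self)
    have hhead := (List.pairwise_cons.mp hpw).1
    have hpw' := (List.pairwise_cons.mp hpw).2
    have hfr0 : blN v ≠ blN b0 := hfresh b0 (List.mem_cons_self)
    rw [insN]
    by_cases h : b0 ≤ v
    · rw [if_pos h]
      have hb0v : blN b0 < blN v := lt_of_le_of_ne (blN_mono h) (Ne.symm hfr0)
      constructor
      · intro b hb
        rcases List.mem_cons.mp hb with rfl | hb' <;> [omega; exact hpos b hb']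
      · rw [List.pairwise_cons]
        refine ⟨?_, hpw⟩
        intro b hb
        rcases List.mem_cons.mp hb with rfl | hb'
        · exact hb0v
        · exact lt_trans (hhead b hb') hb0v
    · rw [if_neg h]
      have hvb0 : blN v < blN b0 :=
        lt_of_le_of_ne (blN_mono (by omega)) hfr0
      obtain ⟨hpos2, hpw2⟩ := ih ⟨fun b hb => hpos b (List.mem_cons_of_mem _ hb), hpw'⟩
        (fun b hb => hfresh b (List.mem_cons_of_mem _ hb))
      constructor
      · intro b hb
        rcases List.mem_cons.mp hb with rfl | hb'
        · exact hb0
        · exact hpos2 b hb'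
      · rw [List.pairwise_cons]
        refine ⟨?_, hpw2⟩
        intro b hb
        rcases insN_mem.mp hb with rfl | hb'
        · exact hvb0
        · exact hhead b hb'

lemma nspan_shift {bs : List Nat} {a b : Nat} (h : NSpan bs (a ^^^ b)) (v : Nat) :
    NSpan bs (v ^^^ a) ↔ NSpan bs (v ^^^ b) := by
  constructor
  · intro h1
    have h2 := nspan_xor h1 h
    have he : (v ^^^ a) ^^^ (a ^^^ b) = v ^^^ b := by
      simp [Nat.xor_comm, Nat.xor_left_comm]
    rwa [he] at h2
  · intro h1
    have h2 := nspan_xor h1 h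
    have he : (v ^^^ b) ^^^ (a ^^^ b) = v ^^^ a := by
      simp [Nat.xor_comm, Nat.xor_left_comm]
    rwa [he] at h2

-- the two folds, maintained in lock step
lemma fold_inv (L : Nat) :
    ∀ (l : List Int), (∀ m ∈ l, 0 ≤ m) →
    ∀ (mb : PySem.Dict Int Int) (bsA bsB : List Nat), InvA mb bsA → InvB bsB →
      (∀ v, NSpan bsA v ↔ NSpan bsB v) →
      ∃ bsA' bsB',
        InvA (l.foldl (fun mb m =>
          let m' := xorcReduce mb (2 ^ L + PySem.Int.bitLength m + 1) m
          if m' ≠ 0 then mb.insert ((PySem.Int.bitLength m' : Int) - 1) m' else mb) mb) bsA' ∧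
        InvB bsB' ∧
        (l.foldl (fun basis v =>
          let v' := altRed basis v
          if v' ≠ 0 then altIns basis v' else basis) (castL bsB)) =
          castL bsB' ∧
        (∀ v, NSpan bsA' v ↔ NSpan bsB' v) := by
  intro l
  induction l with
  | nil => intro _ mb bsA bsB hA hB hspan; exact ⟨bsA, bsB, hA, hB, rfl, hspan⟩
  | cons m ms ih =>
    intro hnn mb bsA bsB hA hB hspan
    have hm0 : 0 ≤ m := hnn m (List.mem_cons_self)
    obtain ⟨M, rfl⟩ : ∃ M : Nat, m = (M : Int) := ⟨m.toNat, (Int.toNat_of_nonneg hm0).symm⟩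
    obtain ⟨rA, hrA, hspA, hstopA⟩ :=
      redA hA (2 ^ L + PySem.Int.bitLength ((M : Nat) : Int) + 1) M
        (by have := Nat.one_le_two_pow (n := L); unfold blN; omega)
    obtain ⟨rB, hrB, hspB, hbitsB⟩ := redB hB M
    have hzA : rA = 0 ↔ NSpan bsA M := redA_zero_iff hA.2.1 hA.2.2 hspA hstopA
    have hzB : rB = 0 ↔ NSpan bsB M := redB_zero_iff hB hspB hbitsB
    have hzero : rA = 0 ↔ rB = 0 := hzA.trans ((hspan M).trans hzB.symm)
    rw [List.foldl_cons, List.foldl_cons]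
    by_cases h0 : rA = 0
    · have h0B : rB = 0 := hzero.mp h0
      have eA : (if xorcReduce mb (2 ^ L + PySem.Int.bitLength ((M : Nat) : Int) + 1) ((M : Nat) : Int) ≠ 0
          then mb.insert ((PySem.Int.bitLength (xorcReduce mb (2 ^ L + PySem.Int.bitLength ((M : Nat) : Int) + 1) ((M : Nat) : Int)) : Int) - 1)
            (xorcReduce mb (2 ^ L + PySem.Int.bitLength ((M : Nat) : Int) + 1) ((M : Nat) : Int)) else mb) = mb := by
        rw [hrA]
        simp [h0]
      have eB : (if altRed (castL bsB) ((M : Nat) : Int) ≠ 0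
          then altIns (castL bsB) (altRed (castL bsB) ((M : Nat) : Int)) else castL bsB) = castL bsB := by
        rw [hrB]
        simp [h0B]
      simp only []
      rw [eA, eB]
      exact ih (fun a ha => hnn a (List.mem_cons_of_mem _ ha)) mb bsA bsB hA hB hspan
    · have h0B : rB ≠ 0 := fun hh => h0 (hzero.mpr hh)
      have hfreshA : ∀ b ∈ bsA, blN rA ≠ blN b := by
        intro b hb heq
        have := lookupTop_of_mem hA.2.1 hb
        rw [← heq] at this
        exact this hstopA
      have hfreshB : ∀ b ∈ bsB, blN rB ≠ blN b := by
        intro b hb heq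
        have h1 : rB.testBit (blN rB - 1) = true := testBit_top h0B
        have h2 := hbitsB b hb
        rw [← heq, h1] at h2
        cases h2
      have hA' : InvA (mb.insert ((blN rA : Int) - 1) ((rA : Nat) : Int)) (rA :: bsA) := by
        refine ⟨?_, ?_, ?_⟩
        · intro k
          by_cases hk : ((blN rA : Int) - 1) = k
          · subst hk
            rw [PySem.Dict.getD_insert_self, lookupTop, if_pos rfl]
          · rw [PySem.Dict.getD_insert_of_ne _ _ _ (fun h => hk h.symm), lookupTop, if_neg hk]
            exact hA.1 k
        · intro b hb
          rcases List.mem_cons.mp hb with rfl | hb'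
          · omega
          · exact hA.2.1 b hb'
        · rw [List.pairwise_cons]
          exact ⟨hfreshA, hA.2.2⟩
      have hB' : InvB (insN bsB rB) := insN_invB hB (by omega) hfreshB
      have hspan' : ∀ v, NSpan (rA :: bsA) v ↔ NSpan (insN bsB rB) v := by
        intro v
        have hmemeq : ∀ b, b ∈ insN bsB rB ↔ b ∈ rB :: bsB := by
          intro b
          rw [insN_mem, List.mem_cons]
        rw [nspan_congr hmemeq v, nspan_cons_iff, nspan_cons_iff]
        have hAB : NSpan bsA (rA ^^^ rB) := by
          have h1 := nspan_xor hspA ((hspan (M ^^^ rB)).mpr hspB)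
          have he : (M ^^^ rA) ^^^ (M ^^^ rB) = rA ^^^ rB := by
            simp [Nat.xor_comm, Nat.xor_left_comm]
          rwa [he] at h1
        rw [hspan v, nspan_shift hAB v, hspan (v ^^^ rB)]
      have eA : (if xorcReduce mb (2 ^ L + PySem.Int.bitLength ((M : Nat) : Int) + 1) ((M : Nat) : Int) ≠ 0
          then mb.insert ((PySem.Int.bitLength (xorcReduce mb (2 ^ L + PySem.Int.bitLength ((M : Nat) : Int) + 1) ((M : Nat) : Int)) : Int) - 1)
            (xorcReduce mb (2 ^ L + PySem.Int.bitLength ((M : Nat) : Int) + 1) ((M : Nat) : Int)) else mb) =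
          mb.insert ((blN rA : Int) - 1) ((rA : Nat) : Int) := by
        rw [hrA]
        simp only [ne_eq, Nat.cast_eq_zero, h0, not_false_eq_true, if_true]
        rfl
      have eB : (if altRed (castL bsB) ((M : Nat) : Int) ≠ 0
          then altIns (castL bsB) (altRed (castL bsB) ((M : Nat) : Int)) else castL bsB) =
          castL (insN bsB rB) := by
        rw [hrB]
        simp only [ne_eq, Nat.cast_eq_zero, h0B, not_false_eq_true, if_true]
        exact altIns_map bsB rB
      simp only []
      rw [eA, eB]
      exact ih (fun a ha => hnn a (List.mem_cons_of_mem _ ha)) _ _ _ hA' hB' hspan' 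

lemma bxor_neg_of_neg_nonneg (a b : Int) (ha : a < 0) (hb : 0 ≤ b) :
    PySem.Int.bxor a b < 0 := by
  unfold PySem.Int.bxor
  have h1 : (0:Int) ≤ (((-a - 1).toNat ^^^ b.toNat : Nat) : Int) := Int.natCast_nonneg _
  split_ifs <;> omega

lemma redA_neg (mb : PySem.Dict Int Int) (hmb : ∀ k : Int, 0 ≤ mb.getD k 0) :
    ∀ (fuel : Nat) (v : Int), v < 0 → xorcReduce mb fuel v < 0 := by
  intro fuel
  induction fuel with
  | zero => intro v hv; exact hv
  | succ f ih =>
    intro v hv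
    rw [xorcReduce]
    by_cases hb : mb.getD ((PySem.Int.bitLength v : Int) - 1) 0 = 0
    · simp only [hb]
      simp [hv]
    · simp only [if_pos hb]
      exact ih _ (bxor_neg_of_neg_nonneg _ _ hv (hmb _))

lemma altRed_neg (basis : List Int) (hbs : ∀ b ∈ basis, 0 ≤ b) (v : Int) (hv : v < 0) :
    altRed basis v < 0 := by
  induction basis generalizing v with
  | nil => exact hv
  | cons b bs ih =>
    unfold altRed
    rw [List.foldl_cons]
    have hb : 0 ≤ b := hbs b (List.mem_cons_self)
    have h1 : PySem.Int.bxor v b < 0 := bxor_neg_of_neg_nonneg v b hv hb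
    exact ih (fun c hc => hbs c (List.mem_cons_of_mem _ hc)) _ (by omega)

lemma castL_nonneg (bs : List Nat) : ∀ b ∈ castL bs, 0 ≤ b := by
  induction bs with
  | nil => intro b hb; cases hb
  | cons c cs ih =>
    intro b hb
    have hc : castL (c :: cs) = ((c : Nat) : Int) :: castL cs := rfl
    rw [hc] at hb
    rcases List.mem_cons.mp hb with rfl | hb'
    · exact Int.natCast_nonneg _
    · exact ih b hb'

lemma red_empty (fuel : Nat) (v : Int) : xorcReduce PySem.Dict.empty fuel v = v := by
  cases fuel with
  | zero => rfl
  | succ f =>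
    rw [xorcReduce]
    simp

lemma blen_posI {v : Int} (h : v ≠ 0) : 1 ≤ PySem.Int.bitLength v := by
  by_contra hc
  have hz : PySem.Int.bitLength v = 0 := by omega
  have h1 := PySem.Int.lt_two_pow_bitLength v
  rw [hz] at h1
  simp at h1
  omega

lemma bxor_eq_zero_iff (a b : Int) : PySem.Int.bxor a b = 0 ↔ a = b := by
  unfold PySem.Int.bxor
  split_ifs with h1 h2 h2
  · simp [Nat.xor_eq_zero_iff]
    omega
  · constructor
    · intro h
      exfalso
      have := Int.natCast_nonneg ((a.toNat ^^^ (-b - 1).toNat : Nat))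
      omega
    · omega
  · constructor
    · intro h
      exfalso
      have := Int.natCast_nonneg (((-a - 1).toNat ^^^ b.toNat : Nat))
      omega
    · omega
  · simp [Nat.xor_eq_zero_iff]
    omega

lemma bxor_nonneg_of_neg_neg (a b : Int) (ha : a < 0) (hb : b < 0) :
    0 ≤ PySem.Int.bxor a b := by
  unfold PySem.Int.bxor
  have h1 : (0:Int) ≤ (((-a - 1).toNat ^^^ (-b - 1).toNat : Nat) : Int) := Int.natCast_nonneg _
  split_ifs <;> omega

lemma red_single_m0 (m0 : Int) (hm0 : m0 ≠ 0) (f : Nat) :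
    xorcReduce (PySem.Dict.empty.insert ((PySem.Int.bitLength m0 : Int) - 1) m0) (f + 2) m0 = 0 := by
  rw [xorcReduce]
  rw [PySem.Dict.getD_insert_self, if_pos hm0, PySem.Int.bxor_self]
  rw [xorcReduce]
  rw [PySem.Int.bitLength_zero]
  rw [PySem.Dict.getD_insert_of_ne _ _ _ (by have := blen_posI hm0; intro he; omega)]
  simp

lemma red_single_c1 (m0 x : Int) (f : Nat)
    (hbl : PySem.Int.bitLength x ≠ PySem.Int.bitLength m0) :
    xorcReduce (PySem.Dict.empty.insert ((PySem.Int.bitLength m0 : Int) - 1) m0) (f + 1) x = x := by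
  rw [xorcReduce]
  rw [PySem.Dict.getD_insert_of_ne _ _ _ (by intro he; apply hbl; omega)]
  simp

lemma red_single_c2 (m0 x : Int) (f : Nat) (hm0 : m0 ≠ 0)
    (hbl : PySem.Int.bitLength x = PySem.Int.bitLength m0)
    (hbl2 : PySem.Int.bitLength (PySem.Int.bxor x m0) ≠ PySem.Int.bitLength m0) :
    xorcReduce (PySem.Dict.empty.insert ((PySem.Int.bitLength m0 : Int) - 1) m0) (f + 2) x =
      PySem.Int.bxor x m0 := by
  rw [xorcReduce]
  rw [show ((PySem.Int.bitLength x : Int) - 1) = ((PySem.Int.bitLength m0 : Int) - 1) by rw [hbl]]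
  rw [PySem.Dict.getD_insert_self, if_pos hm0]
  rw [xorcReduce]
  rw [PySem.Dict.getD_insert_of_ne _ _ _ (by intro he; apply hbl2; omega)]
  simp

lemma foldA_rest (m0 : Int) (hm0 : m0 ≠ 0) (F : Int → Nat) (hF : ∀ m : Int, 2 ≤ F m) :
    ∀ (rest : List Int), (∀ m ∈ rest, m = m0) →
      rest.foldl (fun mb m =>
        let m' := xorcReduce mb (F m) m
        if m' ≠ 0 then mb.insert ((PySem.Int.bitLength m' : Int) - 1) m' else mb)
        (PySem.Dict.empty.insert ((PySem.Int.bitLength m0 : Int) - 1) m0) =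
      PySem.Dict.empty.insert ((PySem.Int.bitLength m0 : Int) - 1) m0 := by
  intro rest
  induction rest with
  | nil => intro _; rfl
  | cons a r ih =>
    intro h
    have ha : a = m0 := h a (List.mem_cons_self)
    subst ha
    rw [List.foldl_cons]
    obtain ⟨k, hk⟩ : ∃ k, F a = k + 2 := ⟨F a - 2, by have := hF a; omega⟩
    simp only [hk, red_single_m0 a hm0 k, ne_eq, not_true_eq_false, if_false]
    exact ih (fun m hm => h m (List.mem_cons_of_mem _ hm))

-- one 'min' pass over copies of a negative m0 leaves a negative value unchanged
lemma altRed_rep_neg (m0 : Int) (hm0 : m0 < 0) (n : Nat) (w : Int) (hw : w < 0) :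
    altRed (List.replicate n m0) w = w := by
  induction n with
  | zero => rfl
  | succ k ih =>
    unfold altRed
    rw [List.replicate_succ, List.foldl_cons]
    have h1 : 0 ≤ PySem.Int.bxor w m0 := bxor_nonneg_of_neg_neg w m0 hw hm0
    rw [min_eq_left (by omega)]
    exact ih

lemma altRed_rep_pos (m0 : Int) (hm0 : m0 < 0) (k : Nat) (x : Int) (hx : 0 < x) :
    altRed (List.replicate (k + 1) m0) x = PySem.Int.bxor x m0 := by
  unfold altRed
  rw [List.replicate_succ, List.foldl_cons]
  have h1 : PySem.Int.bxor x m0 < 0 := by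
    rw [PySem.Int.bxor_comm]
    exact bxor_neg_of_neg_nonneg m0 x hm0 (by omega)
  rw [min_eq_right (by omega)]
  exact altRed_rep_neg m0 hm0 k _ h1

lemma altIns_rep (m0 : Int) (n : Nat) :
    altIns (List.replicate n m0) m0 = List.replicate (n + 1) m0 := by
  cases n with
  | zero => rfl
  | succ k =>
    rw [List.replicate_succ, altIns, if_pos le_rfl, ← List.replicate_succ, ← List.replicate_succ]

lemma foldB_const (m0 : Int) (hm0 : m0 < 0) :
    ∀ (rest : List Int), (∀ m ∈ rest, m = m0) → ∀ (n : Nat),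
      rest.foldl (fun basis v =>
        let v' := altRed basis v
        if v' ≠ 0 then altIns basis v' else basis) (List.replicate n m0) =
      List.replicate (n + rest.length) m0 := by
  intro rest
  induction rest with
  | nil => intro _ n; simp
  | cons a r ih =>
    intro h n
    have ha : a = m0 := h a (List.mem_cons_self)
    subst ha
    rw [List.foldl_cons]
    have h1 : altRed (List.replicate n a) a = a := altRed_rep_neg a hm0 n a hm0
    simp only [h1, ne_eq, show ¬(a = 0) by omega, not_false_eq_true, if_true]
    rw [altIns_rep]
    rw [ih (fun m hm => h m (List.mem_cons_of_mem _ hm)) (n + 1)]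
    congr 1
    simp
    omega

-- the constant negative list branch of Pre_
lemma const_neg_case (x : Int) (l : List Int)
    (hC : l ≠ [] ∧ (∀ m ∈ l, m = l.headI) ∧ l.headI < 0 ∧ x ≠ 0 ∧ x ≠ l.headI ∧
      (PySem.Int.bitLength x ≠ PySem.Int.bitLength l.headI ∨
       PySem.Int.bitLength (PySem.Int.bxor x l.headI) ≠ PySem.Int.bitLength l.headI)) :
    Spec_xor_c x l (xor_c x l) := by
  obtain ⟨hne, hall, hneg, hx0, hxm, hbl⟩ := hC
  obtain ⟨m0, rest, rfl⟩ : ∃ m0 rest, l = m0 :: rest := by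
    cases l with
    | nil => exact absurd rfl hne
    | cons a r => exact ⟨a, r, rfl⟩
  simp only [List.headI] at hall hneg hxm hbl
  have hrest : ∀ m ∈ rest, m = m0 := fun m hm => hall m (List.mem_cons_of_mem _ hm)
  have hm0 : m0 ≠ 0 := by omega
  simp only [Spec_xor_c, xor_c, xor_c_alt]
  have hlen1 : 2 ≤ 2 ^ (m0 :: rest).length := by
    calc (2:Nat) = 2 ^ 1 := rfl
      _ ≤ 2 ^ (m0 :: rest).length := Nat.pow_le_pow_right (by norm_num) (by simp)
  -- A's dict after the fold: the single entry m0
  have hAfold : (m0 :: rest).foldl (fun mb m =>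
      let m' := xorcReduce mb (2 ^ (m0 :: rest).length + PySem.Int.bitLength m + 1) m
      if m' ≠ 0 then mb.insert ((PySem.Int.bitLength m' : Int) - 1) m' else mb)
      PySem.Dict.empty =
      PySem.Dict.empty.insert ((PySem.Int.bitLength m0 : Int) - 1) m0 := by
    rw [List.foldl_cons]
    simp only [red_empty, ne_eq, hm0, not_false_eq_true, if_true]
    exact foldA_rest m0 hm0 _ (fun m => by omega) rest hrest
  -- B's basis after the fold: length-l replicate of m0
  have hBfold : (m0 :: rest).foldl (fun basis v =>
      let v' := altRed basis v
      if v' ≠ 0 then altIns basis v' else basis) [] =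
      List.replicate (rest.length + 1) m0 := by
    rw [List.foldl_cons]
    have h1 : altRed [] m0 = m0 := rfl
    simp only [h1, ne_eq, hm0, not_false_eq_true, if_true]
    have h2 : altIns [] m0 = List.replicate 1 m0 := rfl
    rw [h2, foldB_const m0 hneg rest hrest 1]
    congr 1
    omega
  rw [hAfold, hBfold]
  -- A's final reduce is x or x ^ m0, B's is x or x ^ m0 by sign; both sides decide to false
  obtain ⟨k, hk⟩ : ∃ k, 2 ^ (m0 :: rest).length + PySem.Int.bitLength x + 1 = k + 2 :=
    ⟨2 ^ (m0 :: rest).length + PySem.Int.bitLength x - 1, by omega⟩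
  have hAval : decide (xorcReduce (PySem.Dict.empty.insert
      ((PySem.Int.bitLength m0 : Int) - 1) m0)
      (2 ^ (m0 :: rest).length + PySem.Int.bitLength x + 1) x = 0) = false := by
    rw [hk]
    by_cases hb : PySem.Int.bitLength x = PySem.Int.bitLength m0
    · have hbl2 : PySem.Int.bitLength (PySem.Int.bxor x m0) ≠ PySem.Int.bitLength m0 := by
        rcases hbl with h | h
        · exact absurd hb h
        · exact h
      rw [red_single_c2 m0 x k hm0 hb hbl2]
      simp [bxor_eq_zero_iff, hxm]
    · rw [show k + 2 = (k + 1) + 1 by omega, red_single_c1 m0 x (k + 1) hb]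
      simp [hx0]
  rw [hAval]
  obtain ⟨n, hn⟩ : ∃ n, rest.length + 1 = n + 1 := ⟨rest.length, rfl⟩
  rw [hn]
  rcases lt_trichotomy x 0 with hx | hx | hx
  · rw [altRed_rep_neg m0 hneg (n + 1) x hx]
    simp [hx0]
  · exact absurd hx hx0
  · rw [altRed_rep_pos m0 hneg n x hx]
    simp [bxor_eq_zero_iff, hxm]

-- the window [-2^t, 2^t), closed under Python's xor
def WDw (t : Nat) (v : Int) : Prop := -(2 ^ t : Int) ≤ v ∧ v < 2 ^ t

lemma wdw_zero (t : Nat) : WDw t 0 := by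
  constructor
  · have : (0:Int) < 2 ^ t := by positivity
    omega
  · positivity

lemma bxor_window {t : Nat} {a b : Int} (ha : WDw t a) (hb : WDw t b) :
    WDw t (PySem.Int.bxor a b) := by
  obtain ⟨ha1, ha2⟩ := ha
  obtain ⟨hb1, hb2⟩ := hb
  have hp : ((2 ^ t : Nat) : Int) = (2 ^ t : Int) := by push_cast; rfl
  unfold PySem.Int.bxor WDw
  split_ifs with h1 h2 h2
  · have c1 : a.toNat < 2 ^ t := by omega
    have c2 : b.toNat < 2 ^ t := by omega
    have := Nat.xor_lt_two_pow c1 c2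
    constructor
    · have := Int.natCast_nonneg ((a.toNat ^^^ b.toNat : Nat))
      omega
    · omega
  · have c1 : a.toNat < 2 ^ t := by omega
    have c2 : (-b - 1).toNat < 2 ^ t := by omega
    have := Nat.xor_lt_two_pow c1 c2
    constructor
    · omega
    · have := Int.natCast_nonneg ((a.toNat ^^^ (-b - 1).toNat : Nat))
      omega
  · have c1 : (-a - 1).toNat < 2 ^ t := by omega
    have c2 : b.toNat < 2 ^ t := by omega
    have := Nat.xor_lt_two_pow c1 c2
    constructor
    · omega
    · have := Int.natCast_nonneg (((-a - 1).toNat ^^^ b.toNat : Nat))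
      omega
  · have c1 : (-a - 1).toNat < 2 ^ t := by omega
    have c2 : (-b - 1).toNat < 2 ^ t := by omega
    have := Nat.xor_lt_two_pow c1 c2
    constructor
    · have := Int.natCast_nonneg (((-a - 1).toNat ^^^ (-b - 1).toNat : Nat))
      omega
    · omega

lemma blI_le_iff (v : Int) (i : Nat) : PySem.Int.bitLength v ≤ i ↔ v.natAbs < 2 ^ i := by
  constructor
  · intro h
    have h1 := PySem.Int.lt_two_pow_bitLength v
    exact lt_of_lt_of_le h1 (Nat.pow_le_pow_right (by norm_num) h)
  · intro h
    by_contra hc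
    have hN : v ≠ 0 := by
      intro h0
      rw [h0, PySem.Int.bitLength_zero] at hc
      omega
    have h2 := PySem.Int.two_pow_bitLength_le v hN
    have : 2 ^ i ≤ 2 ^ (PySem.Int.bitLength v - 1) :=
      Nat.pow_le_pow_right (by norm_num) (by omega)
    omega

lemma window_of_bl {t : Nat} {v : Int} (h : PySem.Int.bitLength v ≤ t) : WDw t v := by
  have := (blI_le_iff v t).mp h
  have hp : ((2 ^ t : Nat) : Int) = (2 ^ t : Int) := by push_cast; rfl
  constructor <;> omega

lemma bl_of_window {t : Nat} {v : Int} (h : WDw t v) : PySem.Int.bitLength v ≤ t + 1 := by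
  obtain ⟨h1, h2⟩ := h
  rw [blI_le_iff]
  have hp : ((2 ^ t : Nat) : Int) = (2 ^ t : Int) := by push_cast; rfl
  have : (2:Nat) ^ (t + 1) = 2 ^ t * 2 := by ring
  omega

lemma redW {t : Nat} {mb : PySem.Dict Int Int} (hmb : ∀ k : Int, WDw t (mb.getD k 0)) :
    ∀ (fuel : Nat) (v : Int), WDw t v → WDw t (xorcReduce mb fuel v) := by
  intro fuel
  induction fuel with
  | zero => intro v hv; exact hv
  | succ f ih =>
    intro v hv
    rw [xorcReduce]
    by_cases hb : mb.getD ((PySem.Int.bitLength v : Int) - 1) 0 = 0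
    · simp only [hb]
      simpa using hv
    · simp only [if_pos hb]
      exact ih _ (bxor_window hv (hmb _))

-- A-side window invariant for the fold: stored values windowed, high keys empty
def DWInv (t : Nat) (mb : PySem.Dict Int Int) : Prop :=
  (∀ k : Int, WDw t (mb.getD k 0)) ∧ (∀ k : Int, (t : Int) + 1 ≤ k → mb.getD k 0 = 0)

lemma foldA_window (t : Nat) (F : Int → Nat) :
    ∀ (l : List Int), (∀ m ∈ l, WDw t m) →
    ∀ (mb : PySem.Dict Int Int), DWInv t mb →
      DWInv t (l.foldl (fun mb m =>
        let m' := xorcReduce mb (F m) m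
        if m' ≠ 0 then mb.insert ((PySem.Int.bitLength m' : Int) - 1) m' else mb) mb) := by
  intro l
  induction l with
  | nil => intro _ mb h; exact h
  | cons m ms ih =>
    intro hl mb hI
    rw [List.foldl_cons]
    refine ih (fun a ha => hl a (List.mem_cons_of_mem _ ha)) _ ?_
    by_cases h0 : xorcReduce mb (F m) m = 0
    · simp only [h0, ne_eq, not_true_eq_false, if_false]
      exact hI
    · have hr : WDw t (xorcReduce mb (F m) m) :=
        redW hI.1 (F m) m (hl m (List.mem_cons_self))
      have hbl : PySem.Int.bitLength (xorcReduce mb (F m) m) ≤ t + 1 := bl_of_window hr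
      simp only [ne_eq, h0, not_false_eq_true, if_true]
      constructor
      · intro k
        by_cases hk : ((PySem.Int.bitLength (xorcReduce mb (F m) m) : Int) - 1) = k
        · subst hk
          rw [PySem.Dict.getD_insert_self]
          exact hr
        · rw [PySem.Dict.getD_insert_of_ne _ _ _ (fun h => hk h.symm)]
          exact hI.1 k
      · intro k hk
        rw [PySem.Dict.getD_insert_of_ne _ _ _ (by intro he; omega)]
        exact hI.2 k hk

lemma altIns_mem {bs : List Int} {v c : Int} : c ∈ altIns bs v ↔ c = v ∨ c ∈ bs := by
  induction bs with
  | nil => simp [altIns]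
  | cons b bs ih =>
    rw [altIns]
    by_cases h : b ≤ v
    · rw [if_pos h]
      simp
    · rw [if_neg h]
      simp [ih]
      tauto

lemma altRed_window {t : Nat} (basis : List Int) (hb : ∀ b ∈ basis, WDw t b) (v : Int)
    (hv : WDw t v) : WDw t (altRed basis v) := by
  induction basis generalizing v with
  | nil => exact hv
  | cons b bs ih =>
    unfold altRed
    rw [List.foldl_cons]
    refine ih (fun c hc => hb c (List.mem_cons_of_mem _ hc)) _ ?_
    have h1 : WDw t (PySem.Int.bxor v b) := bxor_window hv (hb b (List.mem_cons_self))
    unfold WDw at h1 hv ⊢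
    rcases min_cases v (PySem.Int.bxor v b) with ⟨hm, _⟩ | ⟨hm, _⟩ <;> rw [hm]
    · exact hv
    · exact h1

lemma foldB_window (t : Nat) :
    ∀ (l : List Int), (∀ m ∈ l, WDw t m) →
    ∀ (basis : List Int), (∀ b ∈ basis, WDw t b) →
      ∀ b ∈ (l.foldl (fun basis v =>
        let v' := altRed basis v
        if v' ≠ 0 then altIns basis v' else basis) basis), WDw t b := by
  intro l
  induction l with
  | nil => intro _ basis h; exact h
  | cons m ms ih =>
    intro hl basis hb
    rw [List.foldl_cons]
    refine ih (fun a ha => hl a (List.mem_cons_of_mem _ ha)) _ ?_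
    by_cases h0 : altRed basis m = 0
    · simp only [h0, ne_eq, not_true_eq_false, if_false]
      exact hb
    · simp only [ne_eq, h0, not_false_eq_true, if_true]
      intro c hc
      rcases altIns_mem.mp hc with rfl | hc'
      · exact altRed_window basis hb m (hl m (List.mem_cons_self))
      · exact hb c hc'

-- a negative value survives Source B's min pass negative, whatever the basis holds
lemma altRed_neg_any (basis : List Int) (v : Int) (hv : v < 0) : altRed basis v < 0 := by
  induction basis generalizing v with
  | nil => exact hv
  | cons b bs ih =>
    unfold altRed
    rw [List.foldl_cons]
    refine ih _ ?_
    rcases le_or_gt 0 b with hb | hb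
    · have h1 : PySem.Int.bxor v b < 0 := bxor_neg_of_neg_nonneg v b hv hb
      rcases min_cases v (PySem.Int.bxor v b) with ⟨hm, _⟩ | ⟨hm, _⟩ <;> omega
    · have h1 : 0 ≤ PySem.Int.bxor v b := bxor_nonneg_of_neg_neg v b hv hb
      rw [min_eq_left (by omega)]
      exact hv

-- a value ≥ 2^(t+1) stays ≥ 2^(t+1) or goes negative under the min pass over a windowed basis
lemma altRed_big {t : Nat} (basis : List Int) (hb : ∀ b ∈ basis, WDw t b) (v : Int)
    (hv : v < 0 ∨ (2:Int) ^ (t + 1) ≤ v) :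
    altRed basis v < 0 ∨ (2:Int) ^ (t + 1) ≤ altRed basis v := by
  induction basis generalizing v with
  | nil => exact hv
  | cons b bs ih =>
    unfold altRed
    rw [List.foldl_cons]
    refine ih (fun c hc => hb c (List.mem_cons_of_mem _ hc)) _ ?_
    rcases hv with hv | hv
    · left
      rcases le_or_gt 0 b with hbs | hbs
      · have h1 : PySem.Int.bxor v b < 0 := bxor_neg_of_neg_nonneg v b hv hbs
        rcases min_cases v (PySem.Int.bxor v b) with ⟨hm, _⟩ | ⟨hm, _⟩ <;> omega
      · have h1 : 0 ≤ PySem.Int.bxor v b := bxor_nonneg_of_neg_neg v b hv hbs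
        rw [min_eq_left (by omega)]
        exact hv
    · rcases le_or_gt 0 b with hbs | hbs
      · right
        -- nonnegative b < 2^t cannot clear v's top bit
        obtain ⟨hb1, hb2⟩ := hb b (List.mem_cons_self)
        have hv0 : 0 ≤ v := le_trans (by positivity) hv
        obtain ⟨V, rfl⟩ : ∃ V : Nat, v = (V : Nat) := ⟨v.toNat, (Int.toNat_of_nonneg hv0).symm⟩
        obtain ⟨Bn, rfl⟩ : ∃ Bn : Nat, b = (Bn : Nat) := ⟨b.toNat, (Int.toNat_of_nonneg hbs).symm⟩
        have hp : ((2 ^ (t+1) : Nat) : Int) = (2 ^ (t+1) : Int) := by push_cast; rfl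
        have hpt : ((2 ^ t : Nat) : Int) = (2 ^ t : Int) := by push_cast; rfl
        have hVn : 2 ^ (t+1) ≤ V := by omega
        have hBn : Bn < 2 ^ t := by omega
        have hV0 : V ≠ 0 := by
          have : (0:Nat) < 2 ^ (t+1) := Nat.two_pow_pos _
          omega
        set j := blN V - 1 with hj
        have hjt : t + 1 ≤ j := by
          have h1 : ¬ blN V ≤ t + 1 := by
            rw [bl_le_iff]
            omega
          have := blN_pos hV0
          omega
        have htb : V.testBit j = true := testBit_top hV0
        have hbb : Bn.testBit j = false :=
          Nat.testBit_lt_two_pow (lt_of_lt_of_le hBn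
            (Nat.pow_le_pow_right (by norm_num) (by omega)))
        have hxt : (V ^^^ Bn).testBit j = true := by
          rw [Nat.testBit_xor, htb, hbb]; rfl
        have hge : 2 ^ (t+1) ≤ V ^^^ Bn :=
          le_trans (Nat.pow_le_pow_right (by norm_num) hjt) (Nat.ge_two_pow_of_testBit hxt)
        rw [PySem.Int.bxor_natCast]
        rcases min_cases ((V:Nat):Int) (((V ^^^ Bn : Nat)) : Int) with ⟨hm, _⟩ | ⟨hm, _⟩ <;>
          rw [hm] <;> omega
      · left
        have h1 : PySem.Int.bxor v b < 0 := by
          rw [PySem.Int.bxor_comm]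
          exact bxor_neg_of_neg_nonneg b v hbs (le_trans (by positivity) hv)
        have hpow : (0:Int) < 2 ^ (t + 1) := by positivity
        rw [min_eq_right (by omega)]
        exact h1

-- the dominating-bit_length branch of Pre_: both programs answer False
lemma dominating_case (x : Int) (l : List Int)
    (hC : x ≠ 0 ∧ ∀ m ∈ l, PySem.Int.bitLength m + 1 < PySem.Int.bitLength x) :
    Spec_xor_c x l (xor_c x l) := by
  obtain ⟨hx0, hdom⟩ := hC
  simp only [Spec_xor_c, xor_c, xor_c_alt]
  rcases eq_or_ne l [] with rfl | hl
  · rw [List.foldl_nil, List.foldl_nil, red_empty]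
    rfl
  · obtain ⟨m1, hm1⟩ := List.exists_mem_of_ne_nil l hl
    have hB2 : 2 ≤ PySem.Int.bitLength x := by
      have := hdom m1 hm1
      omega
    set t := PySem.Int.bitLength x - 2 with ht
    have hWm : ∀ m ∈ l, WDw t m := fun m hm => window_of_bl (by have := hdom m hm; omega)
    have hI0 : DWInv t PySem.Dict.empty := ⟨fun _ => wdw_zero t, fun _ _ => rfl⟩
    have hIF := foldA_window t (fun m => 2 ^ l.length + PySem.Int.bitLength m + 1) l hWm
      PySem.Dict.empty hI0
    have hred : xorcReduce (l.foldl (fun mb m =>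
        let m' := xorcReduce mb (2 ^ l.length + PySem.Int.bitLength m + 1) m
        if m' ≠ 0 then mb.insert ((PySem.Int.bitLength m' : Int) - 1) m' else mb)
        PySem.Dict.empty) (2 ^ l.length + PySem.Int.bitLength x + 1) x = x := by
      rw [xorcReduce]
      have hkey := hIF.2 ((PySem.Int.bitLength x : Int) - 1) (by omega)
      simp only [hkey]
      simp
    rw [hred]
    have hBW := foldB_window t l hWm [] (by simp)
    rcases lt_trichotomy x 0 with hx | hx | hx
    · have hBneg := altRed_neg_any (l.foldl (fun basis v =>
        let v' := altRed basis v
        if v' ≠ 0 then altIns basis v' else basis) []) x hx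
      rw [decide_eq_decide]
      exact iff_of_false (by omega) (fun h0 => absurd h0 (ne_of_lt hBneg))
    · exact absurd hx hx0
    · have hxbig : (2:Int) ^ (t + 1) ≤ x := by
        have h1 := PySem.Int.two_pow_bitLength_le x hx0
        have h2 : x.natAbs = x.toNat := by omega
        have h3 : ((2 ^ (PySem.Int.bitLength x - 1) : Nat) : Int) =
            (2 : Int) ^ (PySem.Int.bitLength x - 1) := by push_cast; rfl
        have h4 : t + 1 = PySem.Int.bitLength x - 1 := by omega
        rw [h4]
        omega
      have hBbig := altRed_big (l.foldl (fun basis v =>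
        let v' := altRed basis v
        if v' ≠ 0 then altIns basis v' else basis) []) hBW x (Or.inr hxbig)
      have hpow : (0:Int) < 2 ^ (t + 1) := by positivity
      have hne : altRed (l.foldl (fun basis v =>
        let v' := altRed basis v
        if v' ≠ 0 then altIns basis v' else basis) []) x ≠ 0 := by
        rcases hBbig with h | h <;> omega
      rw [decide_eq_decide]
      exact iff_of_false (by omega) hne

-- ===== VERDICT (by name: the statement is the Claim_ definition above) =====
theorem xor_c_spec : Claim_equal_xor_c := by
  intro x l _ hPre
  rcases hPre with hPre | hC | hC6
  case inr.inl => exact const_neg_case x l hC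
  case inr.inr => exact dominating_case x l hC6
  simp only [Spec_xor_c, xor_c, xor_c_alt]
  have hInvA0 : InvA PySem.Dict.empty [] := by
    refine ⟨fun k => rfl, fun b hb => absurd hb (List.not_mem_nil), List.Pairwise.nil⟩
  have hInvB0 : InvB [] := ⟨fun b hb => absurd hb (List.not_mem_nil), List.Pairwise.nil⟩
  obtain ⟨bsA', bsB', hA', hB', hBfold, hspan⟩ :=
    fold_inv l.length l hPre PySem.Dict.empty [] [] hInvA0 hInvB0 (fun v => Iff.rfl)
  have hcast0 : ([] : List Int) = castL [] := rfl
  rw [hcast0, hBfold]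
  by_cases hx : 0 ≤ x
  · obtain ⟨N, rfl⟩ : ∃ N : Nat, x = (N : Int) := ⟨x.toNat, (Int.toNat_of_nonneg hx).symm⟩
    obtain ⟨rA, hrA, hspA, hstopA⟩ :=
      redA hA' (2 ^ l.length + PySem.Int.bitLength ((N : Nat) : Int) + 1) N
        (by have := Nat.one_le_two_pow (n := l.length); unfold blN; omega)
    obtain ⟨rB, hrB, hspB, hbitsB⟩ := redB hB' N
    rw [hrA, hrB]
    have h1 : rA = 0 ↔ NSpan bsA' N := redA_zero_iff hA'.2.1 hA'.2.2 hspA hstopA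
    have h2 : rB = 0 ↔ NSpan bsB' N := redB_zero_iff hB' hspB hbitsB
    have h3 : rA = 0 ↔ rB = 0 := h1.trans ((hspan N).trans h2.symm)
    rw [decide_eq_decide]
    constructor
    · intro h
      have : rA = 0 := by exact_mod_cast h
      exact_mod_cast h3.mp this
    · intro h
      have : rB = 0 := by exact_mod_cast h
      exact_mod_cast h3.mpr this
  · push Not at hx
    have hmbpos : ∀ k : Int, 0 ≤ (List.foldl (fun mb m =>
        let m' := xorcReduce mb (2 ^ l.length + PySem.Int.bitLength m + 1) m
        if m' ≠ 0 then mb.insert ((PySem.Int.bitLength m' : Int) - 1) m' else mb)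
        PySem.Dict.empty l).getD k 0 := by
      intro k
      rw [hA'.1 k]
      exact Int.natCast_nonneg _
    have hAneg := redA_neg _ hmbpos (2 ^ l.length + PySem.Int.bitLength x + 1) x hx
    have hBneg : altRed (castL bsB') x < 0 := by
      exact altRed_neg _ (castL_nonneg bsB') x hx
    rw [decide_eq_decide]
    exact ⟨fun h => absurd h (ne_of_lt hAneg), fun h => absurd h (ne_of_lt hBneg)⟩
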